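-- pv_equiv track=rewrite | github.com/wreckster1507/GTM-tool | app/services/tldv_sync.py | _infer_meeting_type
-- ===== SOURCE A (Python) =====
-- def _infer_meeting_type(title: str, summary: str, transcript: str) -> str:
--     text = " ".join(part.lower() for part in [title, summary, transcript] if part)
--     if "poc" in text or "pilot" in text:
--         return "poc"
--     if "demo" in text:
--         return "demo"
--     if "qbr" in text or "quarterly business review" in text:
--         return "qbr"
--     if "discovery" in text or "intro" in text:
--         return "discovery"
--     return "other"
-- ===== SOURCE B (Python) =====
-- # Single left-to-right scan over the combined text: at each position, check which
-- # keywords start there and keep the best (lowest) priority seen; no per-keyword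
-- # substring search and no early-return chain.
-- _KEYWORD_PRIORITY = [
--     ("quarterly business review", 2),
--     ("discovery", 3),
--     ("pilot", 0),
--     ("intro", 3),
--     ("demo", 1),
--     ("poc", 0),
--     ("qbr", 2),
-- ]
-- _LABELS = ("poc", "demo", "qbr", "discovery")
--
--
-- def _infer_meeting_type(title: str, summary: str, transcript: str) -> str:
--     text = " ".join(part.lower() for part in [title, summary, transcript] if part)
--     best = 4
--     for i in range(len(text) + 1):
--         for kw, priority in _KEYWORD_PRIORITY:
--             if priority < best and text.startswith(kw, i):
--                 best = priority
--     return _LABELS[best] if best < 4 else "other"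
-- ===== Notes on version B (the rewrite author's own statement) =====
-- stated objective: alternative
-- what changed: Replaces the if/return chain of per-keyword substring tests with a single left-to-right scan over text positions that keeps the minimum priority of any keyword starting at each position (order-independent min instead of first-match control flow).
import Mathlib
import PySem

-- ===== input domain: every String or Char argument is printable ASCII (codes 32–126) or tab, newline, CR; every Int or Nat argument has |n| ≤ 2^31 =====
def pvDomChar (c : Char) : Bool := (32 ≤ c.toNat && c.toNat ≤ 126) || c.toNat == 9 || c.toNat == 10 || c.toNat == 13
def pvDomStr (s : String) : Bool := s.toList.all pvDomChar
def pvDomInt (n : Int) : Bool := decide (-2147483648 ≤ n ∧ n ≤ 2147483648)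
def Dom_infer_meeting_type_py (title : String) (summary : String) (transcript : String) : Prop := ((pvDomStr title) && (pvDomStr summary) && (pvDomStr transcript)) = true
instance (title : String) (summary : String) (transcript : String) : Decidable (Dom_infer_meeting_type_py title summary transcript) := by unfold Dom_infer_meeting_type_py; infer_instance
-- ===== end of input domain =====

-- B replaces A's if/return chain of substring tests by a single left-to-right scan over
-- text positions keeping the minimum priority of any keyword starting there (alternative).

-- ===== PORT A =====
def infer_meeting_type_py (title : String) (summary : String) (transcript : String) : String :=
  let text := PySem.Str.join " " (([title, summary, transcript].filter (fun p => p != "")).map PySem.Str.lower)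
  if PySem.Str.isIn "poc" text || PySem.Str.isIn "pilot" text then "poc"
  else if PySem.Str.isIn "demo" text then "demo"
  else if PySem.Str.isIn "qbr" text || PySem.Str.isIn "quarterly business review" text then "qbr"
  else if PySem.Str.isIn "discovery" text || PySem.Str.isIn "intro" text then "discovery"
  else "other"

-- ===== PORT B =====
def pvKeywordPriority : List (List Char × Nat) :=
  [("quarterly business review".toList, 2),
   ("discovery".toList, 3),
   ("pilot".toList, 0),
   ("intro".toList, 3),
   ("demo".toList, 1),
   ("poc".toList, 0),
   ("qbr".toList, 2)]

-- Python's text.startswith(kw, i) with 0 ≤ i ≤ len(text) is exactly 'kw is a prefix of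
-- the characters of text from i on'; ported as Chars.startswith on (toList.drop i).
def infer_meeting_type_py_alt (title : String) (summary : String) (transcript : String) : String :=
  let text := PySem.Str.join " " (([title, summary, transcript].filter (fun p => p != "")).map PySem.Str.lower)
  let t := text.toList
  let best : Nat := (List.range (t.length + 1)).foldl (fun best i =>
      pvKeywordPriority.foldl (fun b kp =>
        if decide (kp.2 < b) && PySem.Chars.startswith (t.drop i) kp.1 then kp.2 else b) best) 4
  -- _LABELS[best] if best < 4 else "other"
  if best = 0 then "poc" else if best = 1 then "demo"
  else if best = 2 then "qbr" else if best = 3 then "discovery" else "other"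

-- ===== PRECONDITION & SPEC =====
def Spec_infer_meeting_type_py (title : String) (summary : String) (transcript : String) (out : String) : Prop := out = infer_meeting_type_py_alt title summary transcript
instance (title : String) (summary : String) (transcript : String) (out : String) : Decidable (Spec_infer_meeting_type_py title summary transcript out) := by unfold Spec_infer_meeting_type_py; infer_instance

-- ===== CLAIM (what is proved, stated in full; the proofs are below) =====
def Claim_equal_infer_meeting_type_py : Prop := ∀ (title : String) (summary : String) (transcript : String), Dom_infer_meeting_type_py title summary transcript → Spec_infer_meeting_type_py title summary transcript (infer_meeting_type_py title summary transcript)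

-- ===== LEMMAS AND PROOFS =====

-- the (position, keyword) pairs of B's double scan, flattened
def pvPairs (t : List Char) : List (Nat × (List Char × Nat)) :=
  (List.range (t.length + 1)).flatMap (fun i => pvKeywordPriority.map (fun kp => (i, kp)))

def pvOk (t : List Char) (x : Nat × (List Char × Nat)) : Bool :=
  PySem.Chars.startswith (t.drop x.1) x.2.1

-- 'some keyword of priority p occurs in t', as a Bool
def pvM (t : List Char) (p : Nat) : Bool :=
  pvKeywordPriority.any (fun kp => kp.2 == p && PySem.Chars.isIn kp.1 t)

-- B's double fold equals a single fold over the flattened pair list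
theorem pv_fold_flatten (t : List Char) (b : Nat) :
    (List.range (t.length + 1)).foldl (fun best i =>
      pvKeywordPriority.foldl (fun b kp =>
        if decide (kp.2 < b) && PySem.Chars.startswith (t.drop i) kp.1 then kp.2 else b) best) b
    = (pvPairs t).foldl (fun b x => if decide (x.2.2 < b) && pvOk t x then x.2.2 else b) b := by
  unfold pvPairs
  induction (List.range (t.length + 1)) generalizing b with
  | nil => simp
  | cons i rest ih =>
      simp only [List.foldl_cons, List.flatMap_cons, List.foldl_append, ih, List.foldl_map]
      rfl

-- invariant characterisation of the min-scan
theorem pv_fold_min (t : List Char) (L : List (Nat × (List Char × Nat))) (b : Nat) :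
    let R := L.foldl (fun b x => if decide (x.2.2 < b) && pvOk t x then x.2.2 else b) b
    R ≤ b ∧ (∀ x ∈ L, pvOk t x → R ≤ x.2.2) ∧ (R = b ∨ ∃ x ∈ L, pvOk t x ∧ R = x.2.2) := by
  induction L generalizing b with
  | nil => simp
  | cons y L ih =>
      simp only [List.foldl_cons]
      by_cases h : (decide (y.2.2 < b) && pvOk t y) = true
      · rw [if_pos h]
        simp only [Bool.and_eq_true, decide_eq_true_eq] at h
        obtain ⟨h1, h2, h3⟩ := ih y.2.2
        refine ⟨le_of_lt (lt_of_le_of_lt h1 h.1), ?_, ?_⟩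
        · intro x hx hok
          rcases List.mem_cons.mp hx with rfl | hx
          · exact h1
          · exact h2 x hx hok
        · rcases h3 with h3 | ⟨x, hx, hok, hR⟩
          · exact Or.inr ⟨y, List.mem_cons_self, h.2, h3⟩
          · exact Or.inr ⟨x, List.mem_cons_of_mem _ hx, hok, hR⟩
      · rw [if_neg h]
        simp only [Bool.and_eq_true, decide_eq_true_eq, not_and] at h
        obtain ⟨h1, h2, h3⟩ := ih b
        refine ⟨h1, ?_, ?_⟩
        · intro x hx hok
          rcases List.mem_cons.mp hx with rfl | hx
          · by_cases hlt : x.2.2 < b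
            · exact absurd hok (by simpa using h hlt)
            · omega
          · exact h2 x hx hok
        · rcases h3 with h3 | ⟨x, hx, hok, hR⟩
          · exact Or.inl h3
          · exact Or.inr ⟨x, List.mem_cons_of_mem _ hx, hok, hR⟩

-- 'some pair with priority p is matched in the scan' ↔ 'some keyword of priority p occurs in t'
theorem pv_matched_iff (t : List Char) (p : Nat) :
    (∃ x ∈ pvPairs t, pvOk t x = true ∧ x.2.2 = p) ↔ pvM t p = true := by
  unfold pvM
  rw [List.any_eq_true]
  constructor
  · rintro ⟨x, hx, hok, hp⟩
    unfold pvPairs at hx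
    simp only [List.mem_flatMap, List.mem_map, List.mem_range] at hx
    obtain ⟨j, _, kp, hkp, heq⟩ := hx
    refine ⟨kp, hkp, ?_⟩
    have h1 : kp = x.2 := congrArg Prod.snd heq
    have h2 : j = x.1 := congrArg Prod.fst heq
    simp only [Bool.and_eq_true, beq_iff_eq]
    refine ⟨by rw [h1]; exact hp, ?_⟩
    rw [← PySem.Chars.exists_prefix_drop_iff_isIn]
    exact ⟨x.1, by rw [h1]; exact (PySem.Chars.startswith_iff _ _).mp hok⟩
  · rintro ⟨kp, hkp, hm⟩
    simp only [Bool.and_eq_true, beq_iff_eq] at hm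
    obtain ⟨hp, hin⟩ := hm
    obtain ⟨j, hj⟩ := (PySem.Chars.exists_prefix_drop_iff_isIn (s := t) (sub := kp.1)).mpr hin
    refine ⟨(min j t.length, kp), ?_, ?_, hp⟩
    · unfold pvPairs
      simp only [List.mem_flatMap, List.mem_map, List.mem_range]
      exact ⟨min j t.length, by omega, kp, hkp, rfl⟩
    · unfold pvOk
      rw [PySem.Chars.startswith_iff]
      rcases Nat.lt_or_ge t.length j with h | h
      · rw [min_eq_right (le_of_lt h)]
        rw [List.drop_eq_nil_of_le (le_of_lt h)] at hj
        rw [List.drop_length]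
        exact hj
      · rwa [min_eq_left h]

-- every keyword's priority is below 4
theorem pv_prio_lt (kp : List Char × Nat) (h : kp ∈ pvKeywordPriority) : kp.2 < 4 := by
  fin_cases h <;> simp

theorem pv_best_spec (t : List Char) :
    ((List.range (t.length + 1)).foldl (fun best i =>
      pvKeywordPriority.foldl (fun b kp =>
        if decide (kp.2 < b) && PySem.Chars.startswith (t.drop i) kp.1 then kp.2 else b) best) 4)
    = (if pvM t 0 then 0 else if pvM t 1 then 1 else if pvM t 2 then 2
       else if pvM t 3 then 3 else 4) := by
  rw [pv_fold_flatten t 4]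
  obtain ⟨h1, h2, h3⟩ := pv_fold_min t (pvPairs t) 4
  set best := (pvPairs t).foldl (fun b x => if decide (x.2.2 < b) && pvOk t x then x.2.2 else b) 4 with hbest
  have hub : ∀ p, pvM t p = true → best ≤ p := by
    intro p hm
    obtain ⟨x, hx, hok, hp⟩ := (pv_matched_iff t p).mpr hm
    rw [← hp]; exact h2 x hx hok
  have hcases : best = 4 ∨ pvM t best = true := by
    rcases h3 with h3 | ⟨x, hx, hok, hR⟩
    · exact Or.inl h3
    · exact Or.inr ((pv_matched_iff t best).mp ⟨x, hx, hok, hR.symm⟩)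
  have hself : ∀ p, best = p → best ≠ 4 → pvM t p = true := by
    intro p hp h4
    rcases hcases with h | h
    · exact absurd h h4
    · rw [← hp]; exact h
  split_ifs with h0 h1' h2' h3'
  · have := hub 0 h0; omega
  · have hu := hub 1 h1'
    have : best ≠ 0 := fun h => h0 (hself 0 h (by omega))
    omega
  · have hu := hub 2 h2'
    have e0 : best ≠ 0 := fun h => h0 (hself 0 h (by omega))
    have e1 : best ≠ 1 := fun h => h1' (hself 1 h (by omega))
    omega
  · have hu := hub 3 h3'
    have e0 : best ≠ 0 := fun h => h0 (hself 0 h (by omega))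
    have e1 : best ≠ 1 := fun h => h1' (hself 1 h (by omega))
    have e2 : best ≠ 2 := fun h => h2' (hself 2 h (by omega))
    omega
  · rcases hcases with h | h
    · exact h
    · exfalso
      obtain ⟨kp, hkp, hm⟩ := List.any_eq_true.mp h
      simp only [Bool.and_eq_true, beq_iff_eq] at hm
      have hlt := pv_prio_lt kp hkp
      have hbp : best = kp.2 := hm.1.symm
      have hMb : pvM t best = true := h
      interval_cases h' : best
      · exact h0 hMb
      · exact h1' hMb
      · exact h2' hMb
      · exact h3' hMb
      · omega

set_option maxHeartbeats 1000000 in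
theorem pv_main (text : String) :
    (if PySem.Str.isIn "poc" text || PySem.Str.isIn "pilot" text then "poc"
     else if PySem.Str.isIn "demo" text then "demo"
     else if PySem.Str.isIn "qbr" text || PySem.Str.isIn "quarterly business review" text then "qbr"
     else if PySem.Str.isIn "discovery" text || PySem.Str.isIn "intro" text then "discovery"
     else "other")
    = (if ((List.range (text.toList.length + 1)).foldl (fun best i =>
          pvKeywordPriority.foldl (fun b kp =>
            if decide (kp.2 < b) && PySem.Chars.startswith (text.toList.drop i) kp.1 then kp.2 else b) best) 4) = 0
       then "poc"
       else if ((List.range (text.toList.length + 1)).foldl (fun best i =>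
          pvKeywordPriority.foldl (fun b kp =>
            if decide (kp.2 < b) && PySem.Chars.startswith (text.toList.drop i) kp.1 then kp.2 else b) best) 4) = 1
       then "demo"
       else if ((List.range (text.toList.length + 1)).foldl (fun best i =>
          pvKeywordPriority.foldl (fun b kp =>
            if decide (kp.2 < b) && PySem.Chars.startswith (text.toList.drop i) kp.1 then kp.2 else b) best) 4) = 2
       then "qbr"
       else if ((List.range (text.toList.length + 1)).foldl (fun best i =>
          pvKeywordPriority.foldl (fun b kp =>
            if decide (kp.2 < b) && PySem.Chars.startswith (text.toList.drop i) kp.1 then kp.2 else b) best) 4) = 3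
       then "discovery" else "other") := by
  rw [pv_best_spec text.toList]
  have e0 : (PySem.Str.isIn "poc" text || PySem.Str.isIn "pilot" text) = pvM text.toList 0 := by
    simp [pvM, pvKeywordPriority, PySem.Str.isIn_eq, Bool.or_comm]
  have e1 : PySem.Str.isIn "demo" text = pvM text.toList 1 := by
    simp [pvM, pvKeywordPriority, PySem.Str.isIn_eq]
  have e2 : (PySem.Str.isIn "qbr" text || PySem.Str.isIn "quarterly business review" text) = pvM text.toList 2 := by
    simp [pvM, pvKeywordPriority, PySem.Str.isIn_eq, Bool.or_comm]
  have e3 : (PySem.Str.isIn "discovery" text || PySem.Str.isIn "intro" text) = pvM text.toList 3 := by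
    simp [pvM, pvKeywordPriority, PySem.Str.isIn_eq, Bool.or_comm]
  rw [e0, e1, e2, e3]
  generalize pvM text.toList 0 = m0
  generalize pvM text.toList 1 = m1
  generalize pvM text.toList 2 = m2
  generalize pvM text.toList 3 = m3
  cases m0 <;> cases m1 <;> cases m2 <;> cases m3 <;> rfl

-- ===== VERDICT (by name: the statement is the Claim_ definition above) =====
theorem infer_meeting_type_py_spec : Claim_equal_infer_meeting_type_py := by
  intro title summary transcript _
  unfold Spec_infer_meeting_type_py infer_meeting_type_py infer_meeting_type_py_alt
  exact pv_main _
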